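-- pv_equiv track=rewrite | github.com/Shamanyu/DataStructuresAndAlgorithms | LeetCode/NonDecreasingArray/non_decreasing_array/non_decreasing_array.py | nonDecreasingArray
-- ===== SOURCE A (Python) =====
-- def nonDecreasingArray(nums):
--     problemIndex = None
--     for counter in range(0, len(nums)-1):
--         if nums[counter] > nums[counter+1]:
--             if problemIndex != None:
--                 return False
--             problemIndex = counter
--     return (problemIndex is None or problemIndex == 0 or
--         problemIndex == len(nums)-2 or
--         nums[problemIndex-1] <= nums[problemIndex+1] or
--         nums[problemIndex] <= nums[problemIndex+2])
-- ===== SOURCE B (Python) =====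
-- def nonDecreasingArray(nums):
--     arr = list(nums)
--     fixes = 0
--     for i in range(len(arr) - 1):
--         if arr[i] > arr[i + 1]:
--             fixes += 1
--             if fixes > 1:
--                 return False
--             if i == 0 or arr[i - 1] <= arr[i + 1]:
--                 arr[i] = arr[i + 1]
--             else:
--                 arr[i + 1] = arr[i]
--     return True
-- ===== Notes on version B (the rewrite author's own statement) =====
-- stated objective: alternative
-- what changed: B replaces A's locate-the-single-violation-index-then-final-feasibility-formula with a greedy repair pass over a copy of the array: on each descent it counts a fix and actually patches the array (lower arr[i] or raise arr[i+1]), failing once a second fix is needed.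
import Mathlib
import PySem

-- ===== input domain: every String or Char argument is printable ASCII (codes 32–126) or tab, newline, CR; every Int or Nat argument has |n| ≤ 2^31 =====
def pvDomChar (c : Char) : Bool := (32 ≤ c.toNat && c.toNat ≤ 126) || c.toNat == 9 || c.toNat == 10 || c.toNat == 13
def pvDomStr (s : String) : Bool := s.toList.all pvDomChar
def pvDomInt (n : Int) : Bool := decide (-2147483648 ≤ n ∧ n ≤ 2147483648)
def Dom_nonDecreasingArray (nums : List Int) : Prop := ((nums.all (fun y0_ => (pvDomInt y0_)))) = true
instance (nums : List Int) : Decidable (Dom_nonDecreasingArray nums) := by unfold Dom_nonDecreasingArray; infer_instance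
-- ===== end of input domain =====

-- B changes A's "record the single violation index, then test a final feasibility formula"
-- into a greedy repair pass that patches a copy of the array and counts fixes; neither
-- program mutates its argument (B copies first).  Proved equal on all inputs (both total).

-- Python a[i] for an index that is in range whenever it is evaluated (both programs
-- only evaluate in-range indices thanks to Python's short-circuit `or`)
def pvAt (a : List Int) (i : Nat) : Int := a.getD i 0

-- ===== PORT A =====
-- A's loop `for counter in range(0, len-1)` with early `return False`; fuel k = remaining
-- iterations, state pi = problemIndex; result `none` encodes the early `return False`.
def aGo (nums : List Int) (i : Nat) (k : Nat) (pi : Option Nat) : Option (Option Nat) :=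
  match k with
  | 0 => some pi
  | Nat.succ k' =>
    if pvAt nums i > pvAt nums (i+1) then
      match pi with
      | some _ => none
      | none => aGo nums (i+1) k' (some i)
    else aGo nums (i+1) k' pi

-- A's final boolean (when pi = some p we have 1 ≤ p+1 ≤ len-1, so the Nat
-- subtractions p-1 and len-2 agree with Python on every evaluated branch)
def aFin (nums : List Int) (pi : Option Nat) : Bool :=
  match pi with
  | none => true
  | some p =>
      decide (p = 0) || decide (p = nums.length - 2) ||
      decide (pvAt nums (p-1) ≤ pvAt nums (p+1)) ||
      decide (pvAt nums p ≤ pvAt nums (p+2))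

def nonDecreasingArray (nums : List Int) : Bool :=
  match aGo nums 0 (nums.length - 1) none with
  | none => false
  | some pi => aFin nums pi

-- ===== PORT B =====
-- B's greedy pass: arr is the (copied, then patched) array, fixes the fix counter;
-- `false` is the early `return False`, falling off the loop returns True.
def bGo (arr : List Int) (i : Nat) (k : Nat) (fixes : Nat) : Bool :=
  match k with
  | 0 => true
  | Nat.succ k' =>
    if pvAt arr i > pvAt arr (i+1) then
      if fixes + 1 > 1 then false
      else if i = 0 ∨ pvAt arr (i-1) ≤ pvAt arr (i+1) then
        bGo (arr.set i (pvAt arr (i+1))) (i+1) k' (fixes+1)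
      else
        bGo (arr.set (i+1) (pvAt arr i)) (i+1) k' (fixes+1)
    else bGo arr (i+1) k' fixes

def nonDecreasingArray_alt (nums : List Int) : Bool :=
  bGo nums 0 (nums.length - 1) 0

-- ===== PRECONDITION & SPEC =====
def Spec_nonDecreasingArray (nums : List Int) (out : Bool) : Prop := out = nonDecreasingArray_alt nums
instance (nums : List Int) (out : Bool) : Decidable (Spec_nonDecreasingArray nums out) := by unfold Spec_nonDecreasingArray; infer_instance

-- ===== CLAIM (what is proved, stated in full; the proofs are below) =====
def Claim_equal_nonDecreasingArray : Prop := ∀ (nums : List Int), Dom_nonDecreasingArray nums → Spec_nonDecreasingArray nums (nonDecreasingArray nums)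

-- ===== LEMMAS AND PROOFS =====

-- a descent-free window: no a[j+t] > a[j+t+1] for t < k
def scanOK (a : List Int) (j k : Nat) : Bool :=
  match k with
  | 0 => true
  | Nat.succ k' => decide (pvAt a j ≤ pvAt a (j+1)) && scanOK a (j+1) k'

theorem pvAt_set_ne (a : List Int) (i j : Nat) (v : Int) (h : i ≠ j) :
    pvAt (a.set i v) j = pvAt a j := by
  simp [pvAt, List.getD_eq_getElem?_getD, List.getElem?_set_ne h]

theorem pvAt_set_self (a : List Int) (i : Nat) (v : Int) (h : i < a.length) :
    pvAt (a.set i v) i = v := by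
  simp [pvAt, List.getD_eq_getElem?_getD, h]

-- after the first recorded descent, A's loop just fails on any further descent
theorem aGo_some (k : Nat) : ∀ (a : List Int) (j p : Nat),
    aGo a j k (some p) = if scanOK a j k then some (some p) else none := by
  induction k with
  | zero => intro a j p; simp [aGo, scanOK]
  | succ k ih =>
    intro a j p
    by_cases hd : pvAt a j > pvAt a (j+1)
    · simp [aGo, scanOK, hd, not_le.mpr hd]
    · simp [aGo, scanOK, hd, not_lt.mp hd, ih]

-- after one fix, B's pass just fails on any further descent
theorem bGo_one (k : Nat) : ∀ (a : List Int) (j : Nat),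
    bGo a j k 1 = scanOK a j k := by
  induction k with
  | zero => intro a j; simp [bGo, scanOK]
  | succ k ih =>
    intro a j
    by_cases hd : pvAt a j > pvAt a (j+1)
    · simp [bGo, scanOK, hd, not_le.mpr hd]
    · simp [bGo, scanOK, hd, not_lt.mp hd, ih]

theorem scanOK_set_lt (k : Nat) : ∀ (a : List Int) (i j : Nat) (v : Int), i < j →
    scanOK (a.set i v) j k = scanOK a j k := by
  induction k with
  | zero => intro a i j v _; simp [scanOK]
  | succ k ih =>
    intro a i j v hij
    rw [scanOK, scanOK, pvAt_set_ne a i j v (by omega),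
        pvAt_set_ne a i (j+1) v (by omega), ih a i (j+1) v (by omega)]

-- main simulation: before any descent, both loops agree step for step
theorem mainLemma (k : Nat) : ∀ (a : List Int) (i : Nat), k = a.length - 1 - i →
    (match aGo a i k none with
     | none => false
     | some pi => aFin a pi) = bGo a i k 0 := by
  induction k with
  | zero => intro a i _; simp [aGo, bGo, aFin]
  | succ k ih =>
    intro a i h
    have hn : a.length = i + k + 2 := by omega
    by_cases hd : pvAt a i > pvAt a (i+1)
    · have h2 : ¬ (0 + 1 > 1) := by omega
      simp only [aGo, bGo, if_pos hd, if_neg h2]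
      rw [aGo_some k a (i+1) i]
      by_cases hc : i = 0 ∨ pvAt a (i-1) ≤ pvAt a (i+1)
      · -- lower a[i] to a[i+1]; the patched cell is never read again
        rw [if_pos hc, bGo_one, scanOK_set_lt k a i (i+1) _ (by omega)]
        by_cases hs : scanOK a (i+1) k
        · rw [if_pos hs, hs]
          show aFin a (some i) = true
          rcases hc with hc | hc <;> simp [aFin, hc]
        · have hs' : scanOK a (i+1) k = false := by simpa using hs
          rw [if_neg hs, hs']
      · -- raise a[i+1] to a[i]
        rw [if_neg hc]
        push Not at hc
        obtain ⟨hi0, hlt⟩ := hc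
        rw [bGo_one]
        match k with
        | 0 =>
          -- i was the last comparison: both sides are true (A: i = len-2)
          have hi2 : i = a.length - 2 := by omega
          by_cases hs : scanOK a (i+1) 0
          · rw [if_pos hs]; simp [scanOK, aFin, hi2]
          · exact absurd (by simp [scanOK]) hs
        | Nat.succ k' =>
          have hne2 : ¬ i = a.length - 2 := by omega
          rw [scanOK, scanOK,
              pvAt_set_self a (i+1) _ (by omega),
              pvAt_set_ne a (i+1) (i+2) _ (by omega),
              scanOK_set_lt k' a (i+1) (i+2) _ (by omega)]
          by_cases h3 : pvAt a i ≤ pvAt a (i+2)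
          · have h1 : pvAt a (i+1) ≤ pvAt a (i+2) := by omega
            by_cases hs : scanOK a (i+2) k'
            · rw [hs]
              simp only [decide_eq_true h1, decide_eq_true h3, Bool.and_true]
              show aFin a (some i) = true
              simp [aFin, h3]
            · have hs' : scanOK a (i+2) k' = false := by simpa using hs
              rw [hs']
              simp
          · have hfin : aFin a (some i) = false := by
              simp [aFin, hi0, hne2, not_le.mpr hlt, h3]
            rw [decide_eq_false h3, Bool.false_and]
            cases hs : (decide (pvAt a (i+1) ≤ pvAt a (i+2)) && scanOK a (i+2) k') <;>
              simp [hfin]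
    · simp only [aGo, bGo, if_neg hd]
      exact ih a (i+1) (by omega)

-- ===== VERDICT (by name: the statement is the Claim_ definition above) =====
theorem nonDecreasingArray_spec : Claim_equal_nonDecreasingArray := by
  intro nums _
  show nonDecreasingArray nums = nonDecreasingArray_alt nums
  exact mainLemma (nums.length - 1) nums 0 (by omega)
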